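-- pv_equiv track=rewrite | github.com/SurriyaGokul/stt_lab_7 | metrics_table.py | reaching_definitions
-- ===== SOURCE A (Python) =====
-- def reaching_definitions(blocks, gen, kill):
--     in_sets = [set() for _ in blocks]
--     out_sets = [set() for _ in blocks]
--     changed = True
--     while changed:
--         changed = False
--         for i, block in enumerate(blocks):
--             preds = [i-1] if i > 0 else []
--             in_new = set()
--             for p in preds:
--                 in_new |= out_sets[p]
--             out_new = gen[i] | (in_new - kill[i])
--             if in_new != in_sets[i] or out_new != out_sets[i]:
--                 changed = True
--             in_sets[i] = in_new
--             out_sets[i] = out_new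
--     return in_sets, out_sets
-- ===== SOURCE B (Python) =====
-- def reaching_definitions(blocks, gen, kill):
--     in_sets = []
--     out_sets = []
--     prev = set()
--     for i in range(len(blocks)):
--         out_new = gen[i] | (prev - kill[i])
--         in_sets.append(prev)
--         out_sets.append(out_new)
--         prev = out_new
--     return in_sets, out_sets
-- ===== Notes on version B (the rewrite author's own statement) =====
-- stated objective: faster
-- what changed: Replaced the convergence-tested while-loop fixpoint (which always runs two full dataflow passes over all blocks, rebuilding every in/out set and comparing for change) by a single forward pass over the linear block chain that threads the previous block's out-set through an accumulator, with no while loop, no changed flag and no index-based set assignment.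
import Mathlib
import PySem

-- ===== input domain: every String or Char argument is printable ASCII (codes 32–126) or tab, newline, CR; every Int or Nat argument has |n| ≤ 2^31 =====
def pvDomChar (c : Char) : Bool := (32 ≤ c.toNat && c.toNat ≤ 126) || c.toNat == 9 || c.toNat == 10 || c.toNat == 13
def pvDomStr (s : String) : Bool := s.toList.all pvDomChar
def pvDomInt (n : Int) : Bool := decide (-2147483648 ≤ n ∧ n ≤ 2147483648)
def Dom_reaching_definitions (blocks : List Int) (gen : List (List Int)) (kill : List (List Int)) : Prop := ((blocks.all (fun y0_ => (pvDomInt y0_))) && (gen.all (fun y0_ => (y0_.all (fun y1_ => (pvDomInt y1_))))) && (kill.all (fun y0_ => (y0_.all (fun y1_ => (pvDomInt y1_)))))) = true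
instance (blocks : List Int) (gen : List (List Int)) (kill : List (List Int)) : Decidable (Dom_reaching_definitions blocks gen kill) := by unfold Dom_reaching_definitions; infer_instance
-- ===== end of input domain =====

-- B replaces A's convergence-tested while-loop fixpoint by one forward pass threading the
-- previous block's out-set (objective: faster by a constant factor — one pass instead of two).

-- ===== PORT A =====
-- body of A's 'for i, block in enumerate(blocks)' loop; state = (in_sets, out_sets, changed)
def rdStep (gen kill : List (List Int))
    (st : List (List Int) × List (List Int) × Bool) (ib : Int × Int) :
    List (List Int) × List (List Int) × Bool :=
  let i := ib.1
  let preds : List Int := if i > 0 then [i - 1] else []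
  let in_new : PySem.Set Int :=
    preds.foldl (fun s p => PySem.Set.union s (PySem.List.pyGetD st.2.1 p [])) PySem.Set.empty
  let out_new : PySem.Set Int :=
    PySem.Set.union (PySem.List.pyGetD gen i [])
      (PySem.Set.diff in_new (PySem.List.pyGetD kill i []))
  let changed :=
    if !(PySem.Set.equal in_new (PySem.List.pyGetD st.1 i []))
        || !(PySem.Set.equal out_new (PySem.List.pyGetD st.2.1 i [])) then true else st.2.2
  (PySem.List.pySetD st.1 i in_new, PySem.List.pySetD st.2.1 i out_new, changed)

-- A's 'while changed' loop; the fuel only makes the recursion total (each pass rewrites the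
-- state to the same forward-chained values, so the loop always stops within two passes and
-- any fuel ≥ 2 yields the Python loop's exact result)
def rdLoop (blocks : List Int) (gen kill : List (List Int)) :
    Nat → List (List Int) × List (List Int) × Bool → List (List Int) × List (List Int) × Bool
  | 0, st => st
  | fuel+1, st =>
    if st.2.2 then
      rdLoop blocks gen kill fuel
        ((PySem.List.enumerate blocks).foldl (rdStep gen kill) (st.1, st.2.1, false))
    else st

def reaching_definitions (blocks : List Int) (gen : List (List Int)) (kill : List (List Int)) :
    List (List Int) × List (List Int) :=
  let in_sets : List (List Int) := blocks.map (fun _ => PySem.Set.empty)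
  let out_sets : List (List Int) := blocks.map (fun _ => PySem.Set.empty)
  let st := rdLoop blocks gen kill (blocks.length + 2) (in_sets, out_sets, true)
  (st.1, st.2.1)

-- ===== PORT B =====
-- B's loop body; accumulator = (in_sets, out_sets, prev out-set)
def rdFwdStep (gen kill : List (List Int))
    (acc : List (List Int) × List (List Int) × List Int) (i : Nat) :
    List (List Int) × List (List Int) × List Int :=
  let out_new : PySem.Set Int :=
    PySem.Set.union (PySem.List.pyGetD gen (i : Int) [])
      (PySem.Set.diff acc.2.2 (PySem.List.pyGetD kill (i : Int) []))
  (acc.1 ++ [acc.2.2], acc.2.1 ++ [out_new], out_new)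

def reaching_definitions_alt (blocks : List Int) (gen : List (List Int)) (kill : List (List Int)) :
    List (List Int) × List (List Int) :=
  let st := (List.range blocks.length).foldl (rdFwdStep gen kill) ([], [], PySem.Set.empty)
  (st.1, st.2.1)

-- ===== PRECONDITION & SPEC =====
-- The length bounds are exactly where A's gen[i]/kill[i] do not raise IndexError; the Nodup
-- conditions say the entries of gen and kill really represent Python sets (a set is modelled
-- as a duplicate-free list by the type convention), which every actual Python input satisfies.
def Pre_reaching_definitions (blocks : List Int) (gen : List (List Int)) (kill : List (List Int)) : Prop :=
  blocks.length ≤ gen.length ∧ blocks.length ≤ kill.length ∧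
  (∀ g ∈ gen, g.Nodup) ∧ (∀ k ∈ kill, k.Nodup)
instance (blocks : List Int) (gen : List (List Int)) (kill : List (List Int)) : Decidable (Pre_reaching_definitions blocks gen kill) := by unfold Pre_reaching_definitions; infer_instance

def pvWitness_reaching_definitions : List Int × List (List Int) × List (List Int) :=
  ([1, 2, 3], [[1], [2], []], [[], [1], [2]])

def Spec_reaching_definitions (blocks : List Int) (gen : List (List Int)) (kill : List (List Int)) (out : List (List Int) × List (List Int)) : Prop := out = reaching_definitions_alt blocks gen kill
instance (blocks : List Int) (gen : List (List Int)) (kill : List (List Int)) (out : List (List Int) × List (List Int)) : Decidable (Spec_reaching_definitions blocks gen kill out) := by unfold Spec_reaching_definitions; infer_instance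

-- ===== CLAIM (what is proved, stated in full; the proofs are below) =====
def Claim_equal_reaching_definitions : Prop := ∀ (blocks : List Int) (gen : List (List Int)) (kill : List (List Int)), Dom_reaching_definitions blocks gen kill → Pre_reaching_definitions blocks gen kill → Spec_reaching_definitions blocks gen kill (reaching_definitions blocks gen kill)

-- ===== LEMMAS AND PROOFS =====

-- the forward chain both programs compute: starting at index j with incoming set prev,
-- the next k (in_set, out_set) pairs
def rdChain (gen kill : List (List Int)) : Nat → List Int → Nat → List (List Int) × List (List Int)
  | _, _, 0 => ([], [])
  | j, prev, k+1 =>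
    let out_new : PySem.Set Int :=
      PySem.Set.union (PySem.List.pyGetD gen (j : Int) [])
        (PySem.Set.diff prev (PySem.List.pyGetD kill (j : Int) []))
    let t := rdChain gen kill (j+1) out_new k
    (prev :: t.1, out_new :: t.2)

lemma rdChain_length (gen kill : List (List Int)) :
    ∀ (k j : Nat) (prev : List Int),
      (rdChain gen kill j prev k).1.length = k ∧ (rdChain gen kill j prev k).2.length = k := by
  intro k
  induction k with
  | zero => intro j prev; simp [rdChain]
  | succ k ih => intro j prev; simp [rdChain, ih]

lemma pyGetD_gen_nodup (gen : List (List Int)) (hg : ∀ g ∈ gen, g.Nodup) (j : Nat) :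
    (PySem.List.pyGetD gen ((j : Nat) : Int) ([] : List Int)).Nodup := by
  rw [PySem.List.pyGetD_natCast]
  by_cases h : j < gen.length
  · rw [List.getD_eq_getElem gen [] h]; exact hg _ (List.getElem_mem h)
  · rw [List.getD_eq_default gen [] (by omega)]; exact List.nodup_nil

lemma lastD_cons {α : Type} (l : List α) (a b : α) :
    (a :: l).getLast?.getD b = l.getLast?.getD a := by
  cases l with
  | nil => rfl
  | cons c cs =>
    rw [List.getLast?_cons_cons]
    obtain ⟨x, hx⟩ := Option.isSome_iff_exists.mp
      (List.getLast?_isSome.mpr (List.cons_ne_nil c cs))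
    rw [hx]; rfl

lemma B_fold (gen kill : List (List Int)) :
    ∀ (k j : Nat) (I O : List (List Int)) (prev : List Int),
      (List.range' j k).foldl (rdFwdStep gen kill) (I, O, prev)
        = (I ++ (rdChain gen kill j prev k).1, O ++ (rdChain gen kill j prev k).2,
           (rdChain gen kill j prev k).2.getLastD prev) := by
  intro k
  induction k with
  | zero => intro j I O prev; simp [rdChain, List.range']
  | succ k ih =>
    intro j I O prev
    rw [List.range'_succ, List.foldl_cons]
    rw [show rdFwdStep gen kill (I, O, prev) j =
        (I ++ [prev], O ++ [PySem.Set.union (PySem.List.pyGetD gen (j : Int) [])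
          (PySem.Set.diff prev (PySem.List.pyGetD kill (j : Int) []))],
         PySem.Set.union (PySem.List.pyGetD gen (j : Int) [])
          (PySem.Set.diff prev (PySem.List.pyGetD kill (j : Int) []))) from rfl]
    rw [ih]
    simp [rdChain, lastD_cons]

lemma A_pass (gen kill : List (List Int)) (hg : ∀ g ∈ gen, g.Nodup) :
    ∀ (bs : List Int) (j : Nat) (I O restI restO : List (List Int)) (ch : Bool) (prev : List Int),
      I.length = j → O.length = j → restI.length = bs.length → restO.length = bs.length →
      prev.Nodup →
      (0 < j → (O ++ restO).getD (j-1) [] = prev) →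
      (j = 0 → prev = []) →
      ((PySem.List.enumerate bs (j : Int)).foldl (rdStep gen kill) (I ++ restI, O ++ restO, ch)).1
          = I ++ (rdChain gen kill j prev bs.length).1
      ∧ ((PySem.List.enumerate bs (j : Int)).foldl (rdStep gen kill) (I ++ restI, O ++ restO, ch)).2.1
          = O ++ (rdChain gen kill j prev bs.length).2
      ∧ (restI = (rdChain gen kill j prev bs.length).1 →
         restO = (rdChain gen kill j prev bs.length).2 →
         ((PySem.List.enumerate bs (j : Int)).foldl (rdStep gen kill) (I ++ restI, O ++ restO, ch)).2.2 = ch) := by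
  intro bs
  induction bs with
  | nil =>
    intro j I O restI restO ch prev hI hO hrI hrO _ _ _
    have h1 : restI = [] := List.length_eq_zero_iff.mp (by simpa using hrI)
    have h2 : restO = [] := List.length_eq_zero_iff.mp (by simpa using hrO)
    subst h1; subst h2
    simp [PySem.List.enumerate, rdChain]
  | cons b bt ih =>
    intro j I O restI restO ch prev hI hO hrI hrO hnd hprev hp0
    -- split the rest lists
    obtain ⟨ri0, rit, rfl⟩ : ∃ x xs, restI = x :: xs := by
      cases restI with
      | nil => simp at hrI
      | cons x xs => exact ⟨x, xs, rfl⟩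
    obtain ⟨ro0, rot, rfl⟩ : ∃ x xs, restO = x :: xs := by
      cases restO with
      | nil => simp at hrO
      | cons x xs => exact ⟨x, xs, rfl⟩
    simp only [List.length_cons] at hrI hrO
    -- the out set this step produces
    set out : List Int :=
      PySem.Set.union (PySem.List.pyGetD gen (j : Int) [])
        (PySem.Set.diff prev (PySem.List.pyGetD kill (j : Int) [])) with hout
    -- A's in_new at this step is exactly prev
    have hin : (if ((j : Int)) > 0 then [((j : Int)) - 1] else []).foldl
        (fun s p => PySem.Set.union s (PySem.List.pyGetD (O ++ ro0 :: rot) p []))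
        PySem.Set.empty = prev := by
      by_cases h0 : j = 0
      · subst h0; simpa using (hp0 rfl).symm
      · have hj : 0 < j := Nat.pos_of_ne_zero h0
        rw [if_pos (by exact_mod_cast hj)]
        have hc : ((j : Int)) - 1 = ((j - 1 : Nat) : Int) := by omega
        simp only [List.foldl_cons, List.foldl_nil, hc, PySem.List.pyGetD_natCast]
        have : (O ++ ro0 :: rot).getD (j - 1) [] = prev := hprev hj
        rw [this]
        show PySem.Set.union PySem.Set.empty prev = prev
        rw [show PySem.Set.union PySem.Set.empty prev = PySem.Set.ofList prev from rfl]
        exact PySem.Set.ofList_eq_self_of_nodup prev hnd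
    -- one unfolding of the fold
    have hstep : rdStep gen kill (I ++ ri0 :: rit, O ++ ro0 :: rot, ch) ((j : Int), b)
        = ((I ++ [prev]) ++ rit, (O ++ [out]) ++ rot,
           if !(PySem.Set.equal prev (PySem.List.pyGetD (I ++ ri0 :: rit) (j : Int) []))
              || !(PySem.Set.equal out (PySem.List.pyGetD (O ++ ro0 :: rot) (j : Int) [])) then true else ch) := by
      show (PySem.List.pySetD (I ++ ri0 :: rit) (j : Int) _,
            PySem.List.pySetD (O ++ ro0 :: rot) (j : Int) _, _) = _
      rw [show ((j : Int), b).1 = ((j : Nat) : Int) from rfl] at *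
      simp only [hin, ← hout]
      rw [PySem.List.pySetD_natCast, PySem.List.pySetD_natCast,
          List.set_append, List.set_append, if_neg (by omega), if_neg (by omega),
          hI, hO, Nat.sub_self]
      simp
    have hch : ((j : Int) + 1) = (((j + 1 : Nat)) : Int) := by omega
    have henum : PySem.List.enumerate (b :: bt) (j : Int)
        = ((j : Int), b) :: PySem.List.enumerate bt (((j + 1 : Nat)) : Int) := by
      rw [PySem.List.enumerate_cons, hch]
    have hOnd : out.Nodup :=
      PySem.Set.nodup_union _ _ (pyGetD_gen_nodup gen hg j)
    have ihh := ih (j+1) (I ++ [prev]) (O ++ [out]) rit rot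
      (if !(PySem.Set.equal prev (PySem.List.pyGetD (I ++ ri0 :: rit) (j : Int) []))
          || !(PySem.Set.equal out (PySem.List.pyGetD (O ++ ro0 :: rot) (j : Int) [])) then true else ch)
      out (by simp [hI]) (by simp [hO]) (by omega) (by omega) hOnd
      (by
        intro _
        rw [List.append_assoc]
        rw [List.getD_append_right _ _ _ _ (by omega)]
        simp [hO])
      (by omega)
    rw [henum, List.foldl_cons, hstep]
    have hchain : rdChain gen kill j prev (b :: bt).length
        = (prev :: (rdChain gen kill (j+1) out bt.length).1,
           out :: (rdChain gen kill (j+1) out bt.length).2) := by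
      simp only [List.length_cons, rdChain]
      rw [← hout]
    refine ⟨?_, ?_, ?_⟩
    · rw [ihh.1, hchain]; simp
    · rw [ihh.2.1, hchain]; simp
    · intro hri hro
      rw [hchain] at hri hro
      simp only [List.cons.injEq] at hri hro
      obtain ⟨hri0, hrit⟩ := hri
      obtain ⟨hro0, hrot⟩ := hro
      have heq1 : PySem.List.pyGetD (I ++ ri0 :: rit) (j : Int) [] = prev := by
        rw [PySem.List.pyGetD_natCast, List.getD_append_right _ _ _ _ (by omega), hI,
            Nat.sub_self]
        simp [hri0]
      have heq2 : PySem.List.pyGetD (O ++ ro0 :: rot) (j : Int) [] = out := by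
        rw [PySem.List.pyGetD_natCast, List.getD_append_right _ _ _ _ (by omega), hO,
            Nat.sub_self]
        simp [hro0]
      have hrefl1 : PySem.Set.equal prev prev = true :=
        (PySem.Set.equal_iff _ _).mpr (fun x => Iff.rfl)
      have hrefl2 : PySem.Set.equal out out = true :=
        (PySem.Set.equal_iff _ _).mpr (fun x => Iff.rfl)
      have hcond : (!(PySem.Set.equal prev (PySem.List.pyGetD (I ++ ri0 :: rit) (j : Int) []))
          || !(PySem.Set.equal out (PySem.List.pyGetD (O ++ ro0 :: rot) (j : Int) []))) = false := by
        rw [heq1, heq2, hrefl1, hrefl2]; rfl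
      simp only [hcond, Bool.false_eq_true, if_false] at ihh ⊢
      exact ihh.2.2 hrit hrot

lemma rdLoop_false (blocks : List Int) (gen kill : List (List Int)) (f : Nat)
    (a b : List (List Int)) : rdLoop blocks gen kill f (a, b, false) = (a, b, false) := by
  cases f with
  | zero => rfl
  | succ f => simp [rdLoop]

-- ===== VERDICT (by name: the statement is the Claim_ definition above) =====
theorem reaching_definitions_spec : Claim_equal_reaching_definitions := by
  unfold Claim_equal_reaching_definitions
  intro blocks gen kill _ hpre
  obtain ⟨hgl, hkl, hg, _⟩ := hpre
  unfold Spec_reaching_definitions reaching_definitions reaching_definitions_alt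
  set n := blocks.length with hn
  set init : List (List Int) := blocks.map (fun _ => PySem.Set.empty) with hinit
  have hinitlen : init.length = n := by simp [hinit, hn]
  set C := rdChain gen kill 0 [] n with hC
  have hClen := rdChain_length gen kill n 0 []
  -- first pass
  have h1 := A_pass gen kill hg blocks 0 [] [] init init false []
    rfl rfl hinitlen hinitlen List.nodup_nil (by omega) (fun _ => rfl)
  simp only [List.nil_append, ← hn, ← hC] at h1
  have hP1 : (PySem.List.enumerate blocks).foldl (rdStep gen kill) (init, init, false)
      = (C.1, C.2, ((PySem.List.enumerate blocks).foldl (rdStep gen kill) (init, init, false)).2.2) := by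
    have e0 : ((0 : Nat) : Int) = (0 : Int) := by norm_num
    rw [e0] at h1
    exact Prod.ext h1.1 (Prod.ext h1.2.1 rfl)
  -- second pass, if taken, leaves the state fixed with changed = false
  have h2 := A_pass gen kill hg blocks 0 [] [] C.1 C.2 false []
    rfl rfl (by rw [hC]; exact (rdChain_length gen kill n 0 []).1)
    (by rw [hC]; exact (rdChain_length gen kill n 0 []).2)
    List.nodup_nil (by omega) (fun _ => rfl)
  simp only [List.nil_append, ← hn, ← hC, Nat.cast_zero] at h2
  have hP2 : (PySem.List.enumerate blocks).foldl (rdStep gen kill) (C.1, C.2, false)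
      = (C.1, C.2, false) :=
    Prod.ext h2.1 (Prod.ext h2.2.1 (h2.2.2 (by simp) (by simp)))
  -- run the loop
  have hA1 : (rdLoop blocks gen kill (n + 2) (init, init, true)).1 = C.1 ∧
      (rdLoop blocks gen kill (n + 2) (init, init, true)).2.1 = C.2 := by
    rw [show n + 2 = (n + 1) + 1 from rfl, rdLoop, if_pos rfl, hP1]
    cases hb : ((PySem.List.enumerate blocks).foldl (rdStep gen kill) (init, init, false)).2.2 with
    | false => rw [rdLoop_false]; exact ⟨rfl, rfl⟩
    | true => rw [rdLoop, if_pos rfl, hP2, rdLoop_false]; exact ⟨rfl, rfl⟩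
  -- B's single pass
  have hB : (List.range n).foldl (rdFwdStep gen kill) ([], [], PySem.Set.empty)
      = (C.1, C.2, C.2.getLastD []) := by
    rw [show (PySem.Set.empty : List Int) = [] from rfl, List.range_eq_range',
        B_fold gen kill n 0 [] [] []]
    simp [hC]
  show ((rdLoop blocks gen kill (blocks.length + 2) (init, init, true)).1,
        (rdLoop blocks gen kill (blocks.length + 2) (init, init, true)).2.1)
      = (((List.range blocks.length).foldl (rdFwdStep gen kill) ([], [], PySem.Set.empty)).1,
         ((List.range blocks.length).foldl (rdFwdStep gen kill) ([], [], PySem.Set.empty)).2.1)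
  rw [← hn, hB]
  exact Prod.ext (by simpa using hA1.1) (by simpa using hA1.2)
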